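-- pv_equiv track=rewrite | github.com/njch333-max/njch333-max-Spec_Extraction | App/services/imperial_v6_adapter.py | _merge_adjacent_subrow_items
-- ===== SOURCE A (Python) =====
-- def _merge_adjacent_subrow_items(items: list[dict]) -> list[dict]:
--     """Merge consecutive v6 items where the follow-up has empty area."""
--     merged: list[dict] = []
--     for item in items:
--         cur_area = (item.get("area") or "").strip()
--         if merged and not cur_area:
--             parent = merged[-1]
--             child_specs = (item.get("specs") or "").strip()
--             if child_specs:
--                 parent_specs = (parent.get("specs") or "").strip()
--                 parent["specs"] = f"{parent_specs}\n{child_specs}" if parent_specs else child_specs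
--             if not (parent.get("supplier") or "").strip():
--                 parent["supplier"] = item.get("supplier", "")
--             if not (parent.get("notes") or "").strip():
--                 parent["notes"] = item.get("notes", "")
--         else:
--             merged.append(dict(item))
--     return merged
-- ===== SOURCE B (Python) =====
-- def _append_specs(head: dict, item: dict) -> None:
--     child = (item.get("specs") or "").strip()
--     if child:
--         parent = (head.get("specs") or "").strip()
--         head["specs"] = f"{parent}\n{child}" if parent else child
--
--
-- def _fill_default(head: dict, item: dict, key: str) -> None:
--     if not (head.get(key) or "").strip():
--         head[key] = item.get(key, "")
--
--
-- def _reduce_group(group: list[dict]) -> dict: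
--     head = dict(group[0])
--     for item in group[1:]:
--         _append_specs(head, item)
--         _fill_default(head, item, "supplier")
--         _fill_default(head, item, "notes")
--     return head
--
--
-- def _is_follower(item: dict) -> bool:
--     return not (item.get("area") or "").strip()
--
--
-- def _merge_adjacent_subrow_items(items: list[dict]) -> list[dict]:
--     """Two-pointer scan: each maximal run [i, j) of one leader plus its
--     followers (empty stripped area) is reduced to a single dict."""
--     out: list[dict] = []
--     i, n = 0, len(items)
--     while i < n:
--         j = i + 1
--         while j < n and _is_follower(items[j]):
--             j += 1
--         out.append(_reduce_group(items[i:j]))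
--         i = j
--     return out
-- ===== Notes on version B (the rewrite author's own statement) =====
-- stated objective: alternative
-- what changed: B replaces A's single pass that mutates the last element of the output list with a two-phase decomposition: first partition the items into consecutive groups (a new group starts at each item with non-empty stripped area), then reduce each group independently to one merged dict.
import Mathlib
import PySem

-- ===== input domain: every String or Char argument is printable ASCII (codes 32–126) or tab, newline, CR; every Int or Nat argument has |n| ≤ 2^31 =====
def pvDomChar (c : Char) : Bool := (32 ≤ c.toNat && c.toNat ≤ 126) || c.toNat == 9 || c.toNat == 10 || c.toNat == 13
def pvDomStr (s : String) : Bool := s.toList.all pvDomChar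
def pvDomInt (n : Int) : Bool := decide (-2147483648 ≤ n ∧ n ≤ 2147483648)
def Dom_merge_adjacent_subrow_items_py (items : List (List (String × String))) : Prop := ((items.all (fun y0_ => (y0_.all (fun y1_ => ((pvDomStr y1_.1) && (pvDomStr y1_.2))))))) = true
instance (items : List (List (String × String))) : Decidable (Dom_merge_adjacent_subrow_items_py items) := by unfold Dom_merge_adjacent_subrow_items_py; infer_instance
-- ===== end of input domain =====

-- B re-decomposes A's mutate-the-last-output pass into a two-pointer scan over maximal leader+followers runs, each reduced independently; same cost, alternative structure.

-- ===== PORT A =====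
-- body of A's `if` branch: merge one follow-up item into the parent dict, inline as in A
def pvMergeA (parent : PySem.Dict String String) (item : List (String × String)) : PySem.Dict String String :=
  let itemD := PySem.Dict.mk item
  let child_specs := PySem.Str.strip (itemD.getD "specs" "")
  let p1 := if child_specs ≠ "" then
      let parent_specs := PySem.Str.strip (parent.getD "specs" "")
      parent.insert "specs" (if parent_specs ≠ "" then parent_specs ++ "\n" ++ child_specs else child_specs)
    else parent
  let p2 := if PySem.Str.strip (p1.getD "supplier" "") = "" then p1.insert "supplier" (itemD.getD "supplier" "") else p1
  if PySem.Str.strip (p2.getD "notes" "") = "" then p2.insert "notes" (itemD.getD "notes" "") else p2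

-- one iteration of A's loop over `items` (merged[-1] ↦ getLast?, in-place mutation of it ↦ dropLast ++ [·])
def pvStepA (merged : List (PySem.Dict String String)) (item : List (String × String)) : List (PySem.Dict String String) :=
  let cur_area := PySem.Str.strip ((PySem.Dict.mk item).getD "area" "")
  match merged.getLast? with
  | some parent => if cur_area = "" then merged.dropLast ++ [pvMergeA parent item] else merged ++ [PySem.Dict.mk item]
  | none => merged ++ [PySem.Dict.mk item]

def merge_adjacent_subrow_items_py (items : List (List (String × String))) : List (List (String × String)) :=
  (items.foldl pvStepA []).map (fun d => d.items)

-- ===== PORT B =====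
def pvAppendSpecs (head : PySem.Dict String String) (item : List (String × String)) : PySem.Dict String String :=
  let child := PySem.Str.strip ((PySem.Dict.mk item).getD "specs" "")
  if child ≠ "" then
    let parent := PySem.Str.strip (head.getD "specs" "")
    head.insert "specs" (if parent ≠ "" then parent ++ "\n" ++ child else child)
  else head

def pvFillDefault (head : PySem.Dict String String) (item : List (String × String)) (key : String) : PySem.Dict String String :=
  if PySem.Str.strip (head.getD key "") = "" then head.insert key ((PySem.Dict.mk item).getD key "") else head

-- head = dict(group[0]); fold the followers in via the three field helpers
def pvReduceGroup (group : List (List (String × String))) : List (String × String) :=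
  match group with
  | [] => []          -- group[0] of an empty group: never produced by the scan
  | h :: t =>
      (t.foldl (fun head item =>
        pvFillDefault (pvFillDefault (pvAppendSpecs head item) item "supplier") item "notes")
        (PySem.Dict.mk h)).items

def pvIsFollower (item : List (String × String)) : Bool :=
  PySem.Str.strip ((PySem.Dict.mk item).getD "area" "") == ""

-- the while-loop with two indices i < j: items[i:j] = leader :: (followers via the inner scan)
def merge_adjacent_subrow_items_py_alt (items : List (List (String × String))) : List (List (String × String)) :=
  match items with
  | [] => []
  | h :: t =>
      pvReduceGroup (h :: t.takeWhile pvIsFollower) ::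
        merge_adjacent_subrow_items_py_alt (t.dropWhile pvIsFollower)
termination_by items.length
decreasing_by
  simp only [List.length_cons]
  exact Nat.lt_succ_of_le (List.length_dropWhile_le pvIsFollower t)

-- ===== PRECONDITION & SPEC =====
def Spec_merge_adjacent_subrow_items_py (items : List (List (String × String))) (out : List (List (String × String))) : Prop := out = merge_adjacent_subrow_items_py_alt items
instance (items : List (List (String × String))) (out : List (List (String × String))) : Decidable (Spec_merge_adjacent_subrow_items_py items out) := by unfold Spec_merge_adjacent_subrow_items_py; infer_instance

-- ===== CLAIM (what is proved, stated in full; the proofs are below) =====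
def Claim_equal_merge_adjacent_subrow_items_py : Prop := ∀ (items : List (List (String × String))), Dom_merge_adjacent_subrow_items_py items → Spec_merge_adjacent_subrow_items_py items (merge_adjacent_subrow_items_py items)

-- ===== LEMMAS AND PROOFS =====

lemma pvStepA_ne_nil (l : List (PySem.Dict String String)) (it : List (String × String)) :
    pvStepA l it ≠ [] := by
  unfold pvStepA
  cases l.getLast? <;> dsimp only <;> (try split) <;> simp

lemma pvStepA_append (ms l : List (PySem.Dict String String)) (it : List (String × String))
    (hl : l ≠ []) : pvStepA (ms ++ l) it = ms ++ pvStepA l it := by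
  unfold pvStepA
  rw [List.getLast?_append_of_ne_nil _ hl]
  cases l.getLast? <;> dsimp only
  · simp
  · split
    · rw [List.dropLast_append_of_ne_nil hl]; simp
    · simp

lemma pvFoldA_append (its : List (List (String × String)))
    (ms l : List (PySem.Dict String String)) (hl : l ≠ []) :
    List.foldl pvStepA (ms ++ l) its = ms ++ List.foldl pvStepA l its := by
  induction its generalizing l with
  | nil => rfl
  | cons it rest ih =>
      simp only [List.foldl_cons]
      rw [pvStepA_append ms l it hl]
      exact ih _ (pvStepA_ne_nil l it)

lemma pvFoldA_followers (fs : List (List (String × String)))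
    (hf : ∀ f ∈ fs, pvIsFollower f = true) (p : PySem.Dict String String) :
    List.foldl pvStepA [p] fs = [List.foldl pvMergeA p fs] := by
  induction fs generalizing p with
  | nil => rfl
  | cons f rest ih =>
      have harea : PySem.Str.strip ((PySem.Dict.mk f).getD "area" "") = "" := by
        have := hf f (List.mem_cons_self ..)
        simpa [pvIsFollower] using this
      simp only [List.foldl_cons]
      rw [show pvStepA [p] f = [pvMergeA p f] by simp [pvStepA, harea]]
      exact ih (fun g hg => hf g (List.mem_cons_of_mem _ hg)) _

lemma pvDropWhile_head_false {α : Type} (p : α → Bool) (l : List α) (x : α)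
    (xs : List α) (h : l.dropWhile p = x :: xs) : p x = false := by
  induction l with
  | nil => simp at h
  | cons a t ih =>
      rw [List.dropWhile_cons] at h
      split at h
      · exact ih h
      · next hpa => cases h; simpa using hpa

lemma pvMain (items : List (List (String × String))) :
    (items.foldl pvStepA []).map (fun d => d.items) = merge_adjacent_subrow_items_py_alt items := by
  induction hn : items.length using Nat.strong_induction_on generalizing items with
  | _ n ihn =>
  cases items with
  | nil => simp [merge_adjacent_subrow_items_py_alt]
  | cons h t =>
      have ih : ((t.dropWhile pvIsFollower).foldl pvStepA []).map (fun d => d.items)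
          = merge_adjacent_subrow_items_py_alt (t.dropWhile pvIsFollower) := by
        apply ihn (t.dropWhile pvIsFollower).length _ _ rfl
        subst hn
        exact Nat.lt_succ_of_le (List.length_dropWhile_le pvIsFollower t)
      have hsplit : t = t.takeWhile pvIsFollower ++ t.dropWhile pvIsFollower :=
        (List.takeWhile_append_dropWhile (p := pvIsFollower) (l := t)).symm
      have hq : List.foldl pvStepA [PySem.Dict.mk h] (t.takeWhile pvIsFollower)
          = [List.foldl pvMergeA (PySem.Dict.mk h) (t.takeWhile pvIsFollower)] :=
        pvFoldA_followers _ (fun f hf => List.mem_takeWhile_imp hf) _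
      have hstep0 : pvStepA [] h = [PySem.Dict.mk h] := by
        simp [pvStepA]
      calc (List.foldl pvStepA [] (h :: t)).map (fun d => d.items)
          = (List.foldl pvStepA [PySem.Dict.mk h]
              (t.takeWhile pvIsFollower ++ t.dropWhile pvIsFollower)).map (fun d => d.items) := by
            rw [List.foldl_cons, hstep0, ← hsplit]
        _ = ((List.foldl pvMergeA (PySem.Dict.mk h) (t.takeWhile pvIsFollower)) ::
              List.foldl pvStepA [] (t.dropWhile pvIsFollower)).map (fun d => d.items) := by
            rw [List.foldl_append, hq]
            cases hd : t.dropWhile pvIsFollower with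
            | nil => rfl
            | cons h' t' =>
                have hnf : pvIsFollower h' = false := pvDropWhile_head_false _ t h' t' hd
                have harea : ¬ PySem.Str.strip ((PySem.Dict.mk h').getD "area" "") = "" := by
                  simpa [pvIsFollower] using hnf
                simp only [List.foldl_cons]
                rw [show pvStepA [List.foldl pvMergeA (PySem.Dict.mk h) (t.takeWhile pvIsFollower)] h'
                      = [List.foldl pvMergeA (PySem.Dict.mk h) (t.takeWhile pvIsFollower)] ++ [PySem.Dict.mk h'] by
                    simp [pvStepA, harea]]
                rw [pvFoldA_append _ _ _ (by simp),
                  show pvStepA [] h' = [PySem.Dict.mk h'] from by simp [pvStepA]]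
                simp
        _ = merge_adjacent_subrow_items_py_alt (h :: t) := by
            rw [merge_adjacent_subrow_items_py_alt]
            simp only [List.map_cons]
            rw [← ih]
            congr 1

-- ===== VERDICT (by name: the statement is the Claim_ definition above) =====
theorem merge_adjacent_subrow_items_py_spec : Claim_equal_merge_adjacent_subrow_items_py := by
  intro items _
  exact pvMain items
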